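-- pv_equiv track=rewrite | github.com/habibor-rahaman1010/Learn_Python3 | Basic_python/problem_solve/problem-2.py | goodSequence
-- ===== SOURCE A (Python) =====
-- def goodSequence(n, numbers):
--     if n == 1:
--         return 1
--
--     count = 0
--     arra = []
--     for i in range(1, n + 5):
--         arra.append(0)
--
--     for i in range(n):
--         arra[numbers[i]] += 1
--
--     for i in range(1, len(arra)):
--         if arra[i] > 0:
--             if i > arra[i]:
--                 count += arra[i]
--             elif i < arra[i]:
--                 count += arra[i] - i
--
--     return count
-- ===== SOURCE B (Python) =====
-- def goodSequence(n, numbers):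
--     if n == 1:
--         return 1
--     vals = sorted(numbers[:max(n, 0)])
--     count = 0
--     i = 0
--     while i < len(vals):
--         j = i + 1
--         while j < len(vals) and vals[j] == vals[i]:
--             j += 1
--         v = vals[i]
--         c = j - i
--         if v != 0:
--             if v > c:
--                 count += c
--             elif v < c:
--                 count += c - v
--         i = j
--     return count
-- ===== Notes on version B (the rewrite author's own statement) =====
-- stated objective: alternative
-- what changed: Replaces A's fixed-size histogram array (built by index-increment over a range(1,n+5) scratch list, then an index walk over the whole array) by sorting the first n values and scanning once over maximal runs of equal elements, applying the keep/remove rule per run.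
-- outside the precondition, e.g. on goodSequence(2, [-1, 1]): A returns 1, B returns 2
import Mathlib
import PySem

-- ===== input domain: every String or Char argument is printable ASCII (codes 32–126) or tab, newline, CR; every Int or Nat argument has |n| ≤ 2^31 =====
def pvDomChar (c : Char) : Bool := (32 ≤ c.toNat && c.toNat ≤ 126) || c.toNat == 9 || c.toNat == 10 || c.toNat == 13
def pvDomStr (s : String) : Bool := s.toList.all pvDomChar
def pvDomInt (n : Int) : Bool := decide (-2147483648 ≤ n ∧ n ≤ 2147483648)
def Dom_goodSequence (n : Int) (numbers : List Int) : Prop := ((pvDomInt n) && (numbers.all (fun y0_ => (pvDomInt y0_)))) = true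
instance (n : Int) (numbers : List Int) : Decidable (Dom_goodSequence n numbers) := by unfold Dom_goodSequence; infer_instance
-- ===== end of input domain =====

-- B replaces A's histogram array by a sort-then-run-length scan (alternative decomposition, same result on the natural domain).

-- ===== PORT A =====
-- the literal body of A's second loop, 'arra[numbers[i]] += 1', with the two indexings that can raise
-- (none = IndexError, excluded by Pre_); named so the proofs can speak about it
def pvBody (st : Option (List Int)) (ox : Option Int) : Option (List Int) :=
  match st with
  | none => none
  | some a =>
    match ox with
    | none => none
    | some x =>
      match PySem.List.pyGet? a x with
      | none => none
      | some old => PySem.List.pySet? a x (old + 1)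

def goodSequence (n : Int) (numbers : List Int) : Int :=
  if n = 1 then 1
  else
    -- for i in range(1, n+5): arra.append(0)
    let arra0 : List Int := (PySem.List.pyRange 1 (n + 5) 1).foldl (fun a _ => a ++ [0]) []
    -- for i in range(n): arra[numbers[i]] += 1
    let arra? : Option (List Int) :=
      (PySem.List.pyRange 0 n 1).foldl
        (fun st i => pvBody st (PySem.List.pyGet? numbers i)) (some arra0)
    match arra? with
    | none => 0   -- IndexError: unreachable under Pre_
    | some arra =>
      -- for i in range(1, len(arra)): …
      (PySem.List.pyRange 1 (arra.length : Int) 1).foldl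
        (fun count i =>
          let ai := PySem.List.pyGetD arra i 0
          if ai > 0 then
            if i > ai then count + ai
            else if i < ai then count + (ai - i)
            else count
          else count) 0

-- ===== PORT B =====
-- the run-length scan of Source B: one recursive pass over maximal runs of equal elements of the sorted list
def pvRuns : List Int → Int
  | [] => 0
  | v :: rest =>
    let run := rest.takeWhile (fun x => x == v)
    let c : Int := 1 + run.length
    (if v ≠ 0 then (if v > c then c else if v < c then c - v else 0) else 0)
      + pvRuns (rest.dropWhile (fun x => x == v))
termination_by l => l.length
decreasing_by
  simp only [List.length_cons]
  exact Nat.lt_succ_of_le (List.length_dropWhile_le _ _)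

def goodSequence_alt (n : Int) (numbers : List Int) : Int :=
  if n = 1 then 1
  else pvRuns (PySem.List.sorted (PySem.List.slice numbers none (some (max n 0))) (fun x => x) false)

-- ===== PRECONDITION & SPEC =====
-- Pre_ restricts to the task's natural domain: n == 1, n ≤ 0 (nothing to count), or 0 < n ≤ len(numbers) with the
-- first n values in [0, n+3]. It excludes one kind of input A still returns on: negative values in [-(n+4), -1],
-- which A counts into high histogram cells through Python's negative-index wraparound, an artefact of the fixed-size
-- array and outside the task's natural domain; values > n+3 or len(numbers) < n make A raise IndexError.
def Pre_goodSequence (n : Int) (numbers : List Int) : Prop :=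
  n = 1 ∨ n ≤ 0 ∨ (0 < n ∧ n ≤ (numbers.length : Int) ∧ ∀ x ∈ numbers.take n.toNat, 0 ≤ x ∧ x ≤ n + 3)
instance (n : Int) (numbers : List Int) : Decidable (Pre_goodSequence n numbers) := by
  unfold Pre_goodSequence; infer_instance

def pvWitness_goodSequence : Int × List Int := (5, [1, 2, 2, 3, 3])

def Spec_goodSequence (n : Int) (numbers : List Int) (out : Int) : Prop := out = goodSequence_alt n numbers
instance (n : Int) (numbers : List Int) (out : Int) : Decidable (Spec_goodSequence n numbers out) := by
  unfold Spec_goodSequence; infer_instance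

-- ===== CLAIM (what is proved, stated in full; the proofs are below) =====
def Claim_equal_goodSequence : Prop := ∀ (n : Int) (numbers : List Int), Dom_goodSequence n numbers → Pre_goodSequence n numbers → Spec_goodSequence n numbers (goodSequence n numbers)

-- ===== LEMMAS AND PROOFS =====

-- the per-value contribution both programs compute for a value v occurring c times
def pvF (v c : Int) : Int := if v = 0 then 0 else if v > c then c else if v < c then c - v else 0

theorem pvF_zero_count (v : Int) (hv : 0 ≤ v) : pvF v 0 = 0 := by
  unfold pvF
  rcases eq_or_lt_of_le hv with h | h
  · simp [h.symm]
  · have h1 : v ≠ 0 := by omega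
    have h2 : v > 0 := h
    simp [h1, h2]

-- the pure histogram step 'arra[x] += 1'
def pvStep (a : List Int) (x : Int) : List Int := a.set x.toNat (a.getD x.toNat 0 + 1)

theorem pvStep_length (a : List Int) (x : Int) : (pvStep a x).length = a.length := by
  simp [pvStep]

theorem pvFold_length (l a : List Int) : (l.foldl pvStep a).length = a.length := by
  induction l generalizing a with
  | nil => rfl
  | cons x t ih => simpa [pvStep_length] using ih (pvStep a x)

-- A's Option-state loop never raises and equals the pure fold when all values index into a
theorem pvFold_some (l : List Int) (a : List Int)
    (hb : ∀ x ∈ l, 0 ≤ x ∧ x < (a.length : Int)) :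
    l.foldl (fun st x => pvBody st (some x)) (some a) = some (l.foldl pvStep a) := by
  induction l generalizing a with
  | nil => rfl
  | cons x t ih =>
    obtain ⟨hx0, hxlt⟩ := hb x (by simp)
    have hlt : x.toNat < a.length := by omega
    have hget : PySem.List.pyGet? a x = some (a.getD x.toNat 0) := by
      rw [PySem.List.pyGet?_of_nonneg (h := hx0), List.getElem?_eq_getElem hlt,
        List.getD_eq_getElem a 0 hlt]
    have hset : PySem.List.pySet? a x (a.getD x.toNat 0 + 1) = some (pvStep a x) := by
      have hc := PySem.List.pySet?_natCast (xs := a) (n := x.toNat) (v := a.getD x.toNat 0 + 1) hlt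
      rw [pvStep, ← hc]
      congr 1
      omega
    rw [List.foldl_cons]
    have hbody : pvBody (some a) (some x) = some (pvStep a x) := by
      simp only [pvBody, hget, hset]
    rw [hbody]
    exact ih (pvStep a x) (fun y hy => by
      have := hb y (by simp [hy]); simpa [pvStep_length] using this)

-- histogram characterization: cell j ends at its start value plus the count of j
theorem pvFold_getD (l : List Int) (a : List Int)
    (hb : ∀ x ∈ l, 0 ≤ x ∧ x < (a.length : Int)) (j : Nat) (hj : j < a.length) :
    (l.foldl pvStep a).getD j 0 = a.getD j 0 + l.count ((j : Nat) : Int) := by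
  induction l generalizing a with
  | nil => simp
  | cons x t ih =>
    obtain ⟨hx0, hxlt⟩ := hb x (by simp)
    have hxa : x.toNat < a.length := by omega
    rw [List.foldl_cons, ih (pvStep a x)
      (fun y hy => by have := hb y (by simp [hy]); simpa [pvStep_length] using this)
      (by simpa [pvStep_length] using hj)]
    have hstep : (pvStep a x).getD j 0 = if x.toNat = j then a.getD j 0 + 1 else a.getD j 0 := by
      unfold pvStep
      by_cases h : x.toNat = j
      · subst h
        rw [List.getD_eq_getElem _ 0 (by simpa [pvStep_length, pvStep] using hxa),
          List.getElem_set_self, List.getD_eq_getElem _ 0 hxa]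
        simp
      · rw [if_neg h, List.getD_eq_getElem _ 0 (by simpa using hj), List.getElem_set_ne (by omega),
          List.getD_eq_getElem _ 0 hj]
    have hcnt : (x :: t).count ((j : Nat) : Int)
        = t.count ((j : Nat) : Int) + if x.toNat = j then 1 else 0 := by
      by_cases h : x.toNat = j
      · have hx : x = ((j : Nat) : Int) := by omega
        simp [hx]
      · have hx : ¬ (x = ((j : Nat) : Int)) := by omega
        simp [hx, h]
    rw [hstep, hcnt]
    split <;> push_cast <;> ring

-- fold over range(m) indexing xs equals fold over the first m elements
theorem pv_fold_index {β : Type} (xs : List Int) (m : Nat) (hm : m ≤ xs.length)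
    (h : β → Option Int → β) (init : β) :
    (PySem.List.pyRange 0 (m : Int) 1).foldl (fun acc i => h acc (PySem.List.pyGet? xs i)) init
      = (xs.take m).foldl (fun acc x => h acc (some x)) init := by
  induction m generalizing init with
  | zero => simp [PySem.List.pyRange_one_eq_nil]
  | succ k ih =>
    have hk : k ≤ xs.length := Nat.le_of_succ_le hm
    have hklt : k < xs.length := hm
    have hr : PySem.List.pyRange 0 ((k + 1 : Nat) : Int) 1
        = PySem.List.pyRange 0 (k : Int) 1 ++ [(k : Int)] := by
      have := PySem.List.pyRange_one_succ_right (a := 0) (b := (k : Int)) (by positivity)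
      rw [← this]
      norm_num
    have ht : xs.take (k + 1) = xs.take k ++ [xs[k]] := by
      rw [List.take_add_one, List.getElem?_eq_getElem hklt]
      rfl
    rw [hr, ht, List.foldl_append, List.foldl_append, ih hk]
    simp only [List.foldl_cons, List.foldl_nil]
    rw [PySem.List.pyGet?_natCast, List.getElem?_eq_getElem hklt]


-- all elements after dropping the leading run of v are strictly greater than v (sorted input)
theorem pv_dropWhile_gt (v : Int) (rest : List Int)
    (hs : (v :: rest).Pairwise (· ≤ ·)) :
    ∀ x ∈ rest.dropWhile (fun x => x == v), v < x := by
  intro x hx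
  have hge : ∀ y ∈ rest, v ≤ y := (List.pairwise_cons.mp hs).1
  have hsr : rest.Pairwise (· ≤ ·) := (List.pairwise_cons.mp hs).2
  have hsd : (rest.dropWhile (fun x => x == v)).Pairwise (· ≤ ·) :=
    hsr.sublist (List.dropWhile_sublist _)
  cases hd : rest.dropWhile (fun x => x == v) with
  | nil => simp [hd] at hx
  | cons h t =>
    have hhv : h ≠ v := by
      have hh := List.head?_dropWhile_not (p := fun x => x == v) (l := rest)
      rw [hd] at hh
      simpa using hh
    have hhmem : h ∈ rest := by
      refine (List.dropWhile_sublist (fun x => x == v)).mem ?_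
      rw [hd]
      exact List.mem_cons_self
    have hvh : v < h := lt_of_le_of_ne (hge h hhmem) (Ne.symm hhv)
    rw [hd] at hx
    rcases List.mem_cons.mp hx with rfl | hxt
    · exact hvh
    · have hhx : h ≤ x := by
        rw [hd] at hsd
        exact (List.pairwise_cons.mp hsd).1 x hxt
      omega

-- count of the head value of a sorted list is 1 + length of its leading run
theorem pv_count_head (v : Int) (rest : List Int) (hs : (v :: rest).Pairwise (· ≤ ·)) :
    ((v :: rest).count v : Int) = 1 + ((rest.takeWhile (fun x => x == v)).length : Int) := by
  have hsplit : rest = rest.takeWhile (fun x => x == v) ++ rest.dropWhile (fun x => x == v) :=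
    (List.takeWhile_append_dropWhile).symm
  have hcd : (rest.dropWhile (fun x => x == v)).count v = 0 := by
    rw [List.count_eq_zero]
    intro hmem
    exact absurd rfl (ne_of_gt (pv_dropWhile_gt v rest hs v hmem))
  have hct : (rest.takeWhile (fun x => x == v)).count v
      = (rest.takeWhile (fun x => x == v)).length := by
    apply List.count_eq_length.mpr
    intro x hx
    have hxv := List.mem_takeWhile_imp hx
    rw [beq_iff_eq] at hxv
    exact hxv.symm
  have hrest : rest.count v = (rest.takeWhile (fun x => x == v)).count v
      + (rest.dropWhile (fun x => x == v)).count v := by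
    conv_lhs => rw [hsplit]
    rw [List.count_append]
  rw [List.count_cons_self, hrest, hcd, hct]
  push_cast
  ring

-- counts of other values survive dropping the leading run
theorem pv_count_tail (v j : Int) (rest : List Int) (hj : j ≠ v) :
    (v :: rest).count j = (rest.dropWhile (fun x => x == v)).count j := by
  have hsplit : rest = rest.takeWhile (fun x => x == v) ++ rest.dropWhile (fun x => x == v) :=
    (List.takeWhile_append_dropWhile).symm
  have hct : (rest.takeWhile (fun x => x == v)).count j = 0 := by
    rw [List.count_eq_zero]
    intro hmem
    have hmv := List.mem_takeWhile_imp hmem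
    rw [beq_iff_eq] at hmv
    exact hj hmv
  have h1 : (v :: rest).count j = rest.count j := by
    simp [Ne.symm hj]
  have hrest : rest.count j = (rest.takeWhile (fun x => x == v)).count j
      + (rest.dropWhile (fun x => x == v)).count j := by
    conv_lhs => rw [hsplit]
    rw [List.count_append]
  rw [h1, hrest, hct]
  omega

-- a sum over a nodup index list changes only at the one index where the functions differ
theorem pv_sum_congr_except (R : List Int) (hnd : R.Nodup) (v : Int) (f g : Int → Int)
    (hfg : ∀ j, j ≠ v → f j = g j) :
    (R.map f).sum = (R.map g).sum + (if v ∈ R then f v - g v else 0) := by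
  induction R with
  | nil => simp
  | cons x t ih =>
    have hndt : t.Nodup := (List.nodup_cons.mp hnd).2
    have hxt : x ∉ t := (List.nodup_cons.mp hnd).1
    by_cases hxv : x = v
    · subst hxv
      have hvt : x ∉ t := hxt
      simp only [List.map_cons, List.sum_cons, ih hndt, List.mem_cons, true_or, if_pos]
      simp only [hvt, if_neg, not_false_iff, add_zero]
      ring
    · have hfx : f x = g x := hfg x hxv
      have hiff : (v = x ∨ v ∈ t) ↔ v ∈ t := by
        constructor
        · rintro (h | h)
          · exact absurd h.symm hxv
          · exact h
        · exact Or.inr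
      simp only [List.map_cons, List.sum_cons, ih hndt, hfx, List.mem_cons, hiff]
      ring

-- core: the run-length scan of a sorted nonnegative list equals the histogram sum over any
-- nodup index list R of positive indices containing every positive value of s
theorem pvRuns_eq_sum (m : Nat) (s : List Int) (hm : s.length ≤ m) (R : List Int)
    (hnd : R.Nodup) (hs : s.Pairwise (· ≤ ·)) (hpos : ∀ x ∈ s, 0 ≤ x)
    (hR : ∀ x ∈ s, 0 < x → x ∈ R) (hRpos : ∀ j ∈ R, 0 < j) :
    pvRuns s = (R.map (fun j => pvF j (s.count j))).sum := by
  induction m generalizing s R with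
  | zero =>
    have : s = [] := List.length_eq_zero_iff.mp (Nat.le_zero.mp hm)
    subst this
    have hz : ∀ j ∈ R, pvF j (([] : List Int).count j) = 0 := by
      intro j hj
      simpa using pvF_zero_count j (le_of_lt (hRpos j hj))
    rw [pvRuns, List.map_congr_left hz]
    simp
  | succ k ih =>
    cases s with
    | nil =>
      have hz : ∀ j ∈ R, pvF j (([] : List Int).count j) = 0 := by
        intro j hj
        simpa using pvF_zero_count j (le_of_lt (hRpos j hj))
      rw [pvRuns, List.map_congr_left hz]
      simp
    | cons v rest =>
      set d := rest.dropWhile (fun x => x == v) with hd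
      have hdlen : d.length ≤ k := by
        have h1 : d.length ≤ rest.length := List.length_dropWhile_le _ _
        have h2 : rest.length ≤ k := by simpa using hm
        omega
      have hsd : d.Pairwise (· ≤ ·) :=
        ((List.pairwise_cons.mp hs).2).sublist (List.dropWhile_sublist _)
      have hdsub : ∀ x ∈ d, x ∈ v :: rest := fun x hx =>
        List.mem_cons_of_mem v ((List.dropWhile_sublist _).mem hx)
      have hIH : pvRuns d = (R.map (fun j => pvF j (d.count j))).sum :=
        ih d hdlen R hnd hsd (fun x hx => hpos x (hdsub x hx))
          (fun x hx h0 => hR x (hdsub x hx) h0) hRpos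
      have hdv : d.count v = 0 := by
        rw [List.count_eq_zero]
        intro hmem
        exact absurd rfl (ne_of_gt (pv_dropWhile_gt v rest hs v hmem))
      have hv0 : 0 ≤ v := hpos v (by simp)
      have hcongr : ∀ j, j ≠ v → pvF j ((v :: rest).count j) = pvF j (d.count j) := by
        intro j hj
        rw [pv_count_tail v j rest hj]
      have hsum := pv_sum_congr_except R hnd v
        (fun j => pvF j ((v :: rest).count j)) (fun j => pvF j (d.count j)) hcongr
      have hc : (1 + ((rest.takeWhile (fun x => x == v)).length : Int))
          = ((v :: rest).count v : Int) := (pv_count_head v rest hs).symm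
      rw [pvRuns]
      rw [← hd, hIH, hsum]
      by_cases hvR : v ∈ R
      · have hg0 : pvF v (d.count v) = 0 := by
          rw [hdv]; exact pvF_zero_count v hv0
        have hvpos : 0 < v := hRpos v hvR
        have hvne : v ≠ 0 := by omega
        simp only [hvR, if_pos, hg0, sub_zero, hc]
        unfold pvF
        split_ifs <;> omega
      · have hveq : v = 0 := by
          by_contra hne
          exact hvR (hR v (by simp) (by omega))
        subst hveq
        simp only [hvR, if_neg, not_false_iff, add_zero]
        simp [pvF]

-- ===== VERDICT (by name: the statement is the Claim_ definition above) =====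
theorem goodSequence_spec : Claim_equal_goodSequence := by
  intro n numbers _ hpre
  unfold Spec_goodSequence goodSequence goodSequence_alt
  by_cases h1 : n = 1
  · simp [h1]
  · rcases hpre with h1' | hneg | ⟨hn0, hnlen, hbounds⟩
    · exact absurd h1' h1
    · -- n ≤ 0: both loops of A are empty and B's slice is empty; both return 0
      simp only [h1, if_false]
      rw [PySem.List.pyRange_one_eq_nil (by omega : n ≤ 0), List.foldl_nil]
      have harra0 : (PySem.List.pyRange 1 (n + 5) 1).foldl (fun a _ => a ++ [0]) ([] : List Int)
          = List.replicate (PySem.List.pyRange 1 (n + 5) 1).length (0 : Int) := by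
        rw [PySem.List.foldl_append_singleton_eq_map (f := fun _ => (0 : Int))]
        rw [List.map_const']
        simp
      rw [harra0]
      dsimp only
      have hmax : max n 0 = 0 := by omega
      have hsliceB : PySem.List.slice numbers none (some (max n 0)) = ([] : List Int) := by
        rw [hmax, PySem.List.slice_to _ (by omega : (0:Int) ≤ 0)]
        simp
      rw [hsliceB]
      have hsortB : PySem.List.sorted ([] : List Int) (fun x => x) false = [] :=
        (PySem.List.sorted_eq_nil_iff _ _ _).mpr rfl
      rw [hsortB]
      set M : Nat := (PySem.List.pyRange 1 (n + 5) 1).length with hM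
      have hz : (PySem.List.pyRange 1 ((List.replicate M (0 : Int)).length : Int) 1).foldl
          (fun count i =>
            if PySem.List.pyGetD (List.replicate M (0 : Int)) i 0 > 0 then
              if i > PySem.List.pyGetD (List.replicate M (0 : Int)) i 0 then
                count + PySem.List.pyGetD (List.replicate M (0 : Int)) i 0
              else if i < PySem.List.pyGetD (List.replicate M (0 : Int)) i 0 then
                count + (PySem.List.pyGetD (List.replicate M (0 : Int)) i 0 - i)
              else count
            else count) 0
          = (PySem.List.pyRange 1 ((List.replicate M (0 : Int)).length : Int) 1).foldl
              (fun count _ => count) 0 := by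
        apply PySem.List.foldl_congr_mem
        intro acc i hi
        obtain ⟨hi1, hiM⟩ := (PySem.List.mem_pyRange_one).mp hi
        have hgd : PySem.List.pyGetD (List.replicate M (0 : Int)) i 0 = 0 := by
          rw [PySem.List.pyGetD_of_nonneg _ _ (by omega)]
          rw [List.getD_eq_getElem _ 0
            (by simp only [List.length_replicate] at hiM ⊢; omega)]
          exact List.getElem_replicate _
        rw [hgd]
        norm_num
      rw [hz, PySem.List.foldl_ignore, pvRuns]
    simp only [h1, if_false]
    set t : List Int := numbers.take n.toNat with ht
    set N : Nat := (n + 4).toNat with hN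
    have hNc : ((N : Nat) : Int) = n + 4 := by omega
    -- the scratch list of zeros
    have harra0 : (PySem.List.pyRange 1 (n + 5) 1).foldl (fun a _ => a ++ [0]) ([] : List Int)
        = List.replicate N (0 : Int) := by
      rw [PySem.List.foldl_append_singleton_eq_map (f := fun _ => (0 : Int))]
      rw [List.map_const']
      rw [PySem.List.length_pyRange_one]
      simp only [List.nil_append]
      congr 1
      omega
    rw [harra0]
    have hlen0 : (List.replicate N (0 : Int)).length = N := List.length_replicate
    have hbl : ∀ x ∈ t, 0 ≤ x ∧ x < ((List.replicate N (0 : Int)).length : Int) := by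
      intro x hx
      obtain ⟨hx0, hx3⟩ := hbounds x hx
      refine ⟨hx0, ?_⟩
      rw [hlen0, hNc]
      omega
    -- the counting loop
    have hn' : ((n.toNat : Nat) : Int) = n := by omega
    have hfold : (PySem.List.pyRange 0 n 1).foldl
        (fun st i => pvBody st (PySem.List.pyGet? numbers i)) (some (List.replicate N (0 : Int)))
        = some (t.foldl pvStep (List.replicate N (0 : Int))) := by
      rw [← hn']
      rw [pv_fold_index numbers n.toNat (by omega) pvBody]
      exact pvFold_some t _ hbl
    rw [hfold]
    set arra : List Int := t.foldl pvStep (List.replicate N (0 : Int)) with harra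
    have hlenA : arra.length = N := by
      rw [harra, pvFold_length, hlen0]
    have hcastA : (arra.length : Int) = n + 4 := by
      rw [hlenA, hNc]
    dsimp only
    rw [hcastA]
    -- third loop: each step adds pvF i (t.count i)
    have hai : ∀ i ∈ PySem.List.pyRange 1 (n + 4) 1, PySem.List.pyGetD arra i 0 = t.count i := by
      intro i hi
      obtain ⟨hi1, hi4⟩ := (PySem.List.mem_pyRange_one).mp hi
      have hitn : i.toNat < N := by omega
      have hgd := pvFold_getD t (List.replicate N (0 : Int)) hbl i.toNat (by rw [hlen0]; exact hitn)
      have hrep : (List.replicate N (0 : Int)).getD i.toNat 0 = 0 := by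
        rw [List.getD_eq_getElem _ 0 (by rw [hlen0]; exact hitn)]
        exact List.getElem_replicate _
      have hci : ((i.toNat : Nat) : Int) = i := by omega
      rw [← harra] at hgd
      rw [PySem.List.pyGetD_of_nonneg _ _ (by omega), hgd, hrep, hci]
      ring
    have hcongr3 : (PySem.List.pyRange 1 (n + 4) 1).foldl
        (fun count i =>
          if PySem.List.pyGetD arra i 0 > 0 then
            if i > PySem.List.pyGetD arra i 0 then count + PySem.List.pyGetD arra i 0
            else if i < PySem.List.pyGetD arra i 0 then count + (PySem.List.pyGetD arra i 0 - i)
            else count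
          else count) 0
        = (PySem.List.pyRange 1 (n + 4) 1).foldl
            (fun count i => count + pvF i (t.count i)) 0 := by
      apply PySem.List.foldl_congr_mem
      intro acc i hi
      obtain ⟨hi1, hi4⟩ := (PySem.List.mem_pyRange_one).mp hi
      rw [hai i hi]
      unfold pvF
      split_ifs <;> omega
    rw [hcongr3, PySem.List.foldl_add (g := fun i => pvF i (t.count i))]
    -- B's side
    have hslice : PySem.List.slice numbers none (some (max n 0)) = t := by
      have hmax : max n 0 = n := by omega
      rw [hmax, PySem.List.slice_to _ (by omega : (0:Int) ≤ n)]
    rw [hslice]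
    set s : List Int := PySem.List.sorted t (fun x => x) false with hsdef
    have hperm : s.Perm t := PySem.List.sorted_perm t (fun x => x) false
    have hmem : ∀ x, x ∈ s → x ∈ t := fun x hx => hperm.mem_iff.mp hx
    have hsort : s.Pairwise (· ≤ ·) := by
      have := PySem.List.sorted_pairwise (xs := t) (key := fun x => x)
      simpa using this
    have hrn := pvRuns_eq_sum s.length s le_rfl (PySem.List.pyRange 1 (n + 4) 1)
      (PySem.List.nodup_pyRange_one 1 (n + 4))
      hsort
      (fun x hx => (hbounds x (hmem x hx)).1)
      (fun x hx h0 => (PySem.List.mem_pyRange_one).mpr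
        ⟨by omega, by have := (hbounds x (hmem x hx)).2; omega⟩)
      (fun j hj => by have := (PySem.List.mem_pyRange_one).mp hj; omega)
    rw [hrn]
    have hcounts : ∀ j ∈ PySem.List.pyRange 1 (n + 4) 1,
        pvF j (s.count j) = pvF j (t.count j) := by
      intro j _
      rw [hperm.count_eq]
    rw [List.map_congr_left hcounts]
    ring
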